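-- pv_equiv track=rewrite | github.com/UDC-GAC/ServerlessContainers | src/Rescaler/ClusterScaler.py | get_cpu_list
-- ===== SOURCE A (Python) =====
-- def get_cpu_list(cpu_num_string):
--     cpu_list = list()
--     parts = cpu_num_string.split(",")
--     for part in parts:
--         ranges = part.split("-")
--         if len(ranges) == 1:
--             cpu_list.append(ranges[0])
--         else:
--             for subpart in ranges:
--                 cpu_list.append(subpart)
--     return cpu_list
-- ===== SOURCE B (Python) =====
-- def get_cpu_list(cpu_num_string):
--     # Normalize both separators to "," and split once: A's len==1 branch just
--     # re-appends the whole dash-split, so the result is the flat tokenization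
--     # on both "," and "-".
--     return cpu_num_string.replace("-", ",").split(",")
-- ===== Notes on version B (the rewrite author's own statement) =====
-- stated objective: simpler
-- what changed: Replaced the nested split loops and the len==1 branch by a single separator-normalizing replace('-',',') followed by one split(',').
import Mathlib
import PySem

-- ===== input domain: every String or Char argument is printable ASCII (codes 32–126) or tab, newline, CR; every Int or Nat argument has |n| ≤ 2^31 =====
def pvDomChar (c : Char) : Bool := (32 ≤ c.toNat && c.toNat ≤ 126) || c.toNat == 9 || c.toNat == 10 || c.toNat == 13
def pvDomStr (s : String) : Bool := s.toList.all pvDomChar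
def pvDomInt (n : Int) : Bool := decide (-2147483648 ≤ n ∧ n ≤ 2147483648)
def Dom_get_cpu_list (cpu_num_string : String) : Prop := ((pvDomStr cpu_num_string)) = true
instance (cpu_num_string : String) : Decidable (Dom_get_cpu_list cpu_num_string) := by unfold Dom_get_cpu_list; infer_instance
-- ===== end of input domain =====

-- B replaces A's nested split loops by one separator-normalizing replace('-',',') + a single split(',') (objective: simpler).

-- ===== PORT A =====
def get_cpu_list (cpu_num_string : String) : List String :=
  let cpu_list : List String := []
  -- parts = cpu_num_string.split(",")  (sep ≠ "", so split? is always some)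
  let parts : List String := (PySem.Str.split? cpu_num_string ",").getD []
  parts.foldl (fun cpu_list part =>
    let ranges : List String := (PySem.Str.split? part "-").getD []
    if ranges.length = 1 then
      -- ranges[0]: ranges is never empty, so no IndexError occurs
      cpu_list ++ [(PySem.List.pyGet? ranges 0).getD ""]
    else
      ranges.foldl (fun cpu_list subpart => cpu_list ++ [subpart]) cpu_list) cpu_list

-- ===== PORT B =====
def get_cpu_list_alt (cpu_num_string : String) : List String :=
  (PySem.Str.split? (PySem.Str.replace cpu_num_string "-" ",") ",").getD []

-- ===== PRECONDITION & SPEC =====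
def Spec_get_cpu_list (cpu_num_string : String) (out : List String) : Prop := out = get_cpu_list_alt cpu_num_string
instance (cpu_num_string : String) (out : List String) : Decidable (Spec_get_cpu_list cpu_num_string out) := by unfold Spec_get_cpu_list; infer_instance

-- ===== CLAIM (what is proved, stated in full; the proofs are below) =====
def Claim_equal_get_cpu_list : Prop := ∀ (cpu_num_string : String), Dom_get_cpu_list cpu_num_string → Spec_get_cpu_list cpu_num_string (get_cpu_list cpu_num_string)

-- ===== LEMMAS AND PROOFS =====

-- the character map performed by replace with single-char arguments
def pvMapDash (c : Char) : Char := if c = '-' then ',' else c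

-- replace with single-char old/new is a character map
theorem pv_replace_go_eq (l acc : List Char) :
    PySem.Chars.replace.go ['-'] [','] l.length l acc = acc.reverse ++ l.map pvMapDash := by
  induction l generalizing acc with
  | nil => simp [PySem.Chars.replace.go]
  | cons c t ih =>
    show PySem.Chars.replace.go ['-'] [','] (t.length + 1) (c :: t) acc = _
    rw [PySem.Chars.replace.go]
    by_cases h : c = '-'
    · subst h
      simp only [List.isPrefixOf, beq_self_eq_true, Bool.true_and, if_pos]
      simpa [pvMapDash] using ih ((',' : Char) :: acc)
    · have hpre : List.isPrefixOf ['-'] (c :: t) = false := by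
        simp only [List.isPrefixOf, Bool.and_true, beq_eq_false_iff_ne, ne_eq]
        exact fun hh => h hh.symm
      rw [hpre]
      simp only [Bool.false_eq_true, if_false]
      have hne : ('-' : Char) ≠ c := fun hh => h hh.symm
      simpa [pvMapDash, h, hne] using ih (c :: acc)

theorem pv_replace_eq_map (s : List Char) :
    PySem.Chars.replace s ['-'] [','] = s.map pvMapDash := by
  simpa [PySem.Chars.replace] using pv_replace_go_eq s []

theorem pv_modifyHead_self {α : Type} (l : List α) : l.modifyHead (fun x => x) = l := by
  cases l <;> rfl

-- splitOn with a single-char separator is List.splitOnP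
theorem pv_splitOn_go_eq (c : Char) (l cur : List Char) (bank : List (List Char)) :
    PySem.Chars.splitOn.go [c] (l.length + 1) l cur bank
      = bank.reverse ++ (l.splitOnP (· == c)).modifyHead (cur.reverse ++ ·) := by
  induction l generalizing cur bank with
  | nil => simp [PySem.Chars.splitOn.go, List.splitOnP_nil]
  | cons x t ih =>
    show PySem.Chars.splitOn.go [c] (t.length + 1 + 1) (x :: t) cur bank = _
    rw [PySem.Chars.splitOn.go]
    by_cases h : x = c
    · subst h
      simp only [List.isPrefixOf, beq_self_eq_true, Bool.true_and, if_pos,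
        List.length_cons, List.drop_succ_cons, List.drop_zero, List.length_nil]
      rw [ih [] (cur.reverse :: bank)]
      simp [List.splitOnP_cons, pv_modifyHead_self]
    · have hpre : List.isPrefixOf [c] (x :: t) = false := by
        simp only [List.isPrefixOf, Bool.and_true, beq_eq_false_iff_ne, ne_eq]
        exact fun hh => h hh.symm
      rw [hpre]
      simp only [Bool.false_eq_true, if_false]
      rw [ih (x :: cur) bank]
      have hsp : List.splitOnP (· == c) (x :: t)
          = (List.splitOnP (· == c) t).modifyHead (List.cons x) := by
        simp [List.splitOnP_cons, h]
      rw [hsp, List.modifyHead_modifyHead]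
      rw [show ((fun p => cur.reverse ++ p) ∘ List.cons x) = (fun p => (x :: cur).reverse ++ p)
        from funext fun p => by simp]

theorem pv_splitOn_single (c : Char) (s : List Char) :
    PySem.Chars.splitOn s [c] = s.splitOnP (· == c) := by
  have h := pv_splitOn_go_eq c s [] []
  simpa [PySem.Chars.splitOn, pv_modifyHead_self] using h

-- THE KEY LEMMA: splitting the normalized string on ',' = flat-mapping the '-' split over the ',' split
theorem pv_key (s : List Char) :
    (s.map pvMapDash).splitOnP (· == ',')
      = (s.splitOnP (· == ',')).flatMap (fun p => p.splitOnP (· == '-')) := by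
  induction s with
  | nil => simp [List.splitOnP_nil]
  | cons x t ih =>
    by_cases hc : x = ','
    · subst hc
      simp [List.splitOnP_cons, pvMapDash, ih]
    · by_cases hd : x = '-'
      · subst hd
        simp only [List.map_cons, pvMapDash, List.splitOnP_cons, beq_self_eq_true,
          if_pos, ih]
        have hx : ('-' : Char) ≠ ',' := by decide
        simp only [beq_iff_eq, if_neg hx]
        -- RHS: modifyHead (cons '-') then flatMap; head split on '-' gains a leading []
        obtain ⟨p, ps, hps⟩ := List.exists_cons_of_ne_nil (List.splitOnP_ne_nil (· == ',') t)
        rw [hps]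
        simp [List.splitOnP_cons]
      · have hmap : pvMapDash x = x := by simp [pvMapDash, hd]
        simp only [List.map_cons, hmap, List.splitOnP_cons, beq_iff_eq, if_neg hc, ih]
        obtain ⟨p, ps, hps⟩ := List.exists_cons_of_ne_nil (List.splitOnP_ne_nil (· == ',') t)
        rw [hps]
        simp [List.splitOnP_cons, hd]
        obtain ⟨q, qs, hqs⟩ := List.exists_cons_of_ne_nil (List.splitOnP_ne_nil (· == '-') p)
        rw [hqs]
        simp

-- bridge: the String-level split (sep a single char) maps under toList to splitOnP
theorem pv_map_toList_split (p : String) (sep : String) (c : Char) (hsep : sep.toList = [c]) :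
    ((PySem.Str.split? p sep).getD []).map String.toList
      = p.toList.splitOnP (· == c) := by
  have h := PySem.Str.split?_map p sep
  rw [hsep] at h
  have : PySem.Chars.split? p.toList [c] = some (PySem.Chars.splitOn p.toList [c]) := by
    simp [PySem.Chars.split?]
  rw [this] at h
  rcases ho : PySem.Str.split? p sep with _ | parts
  · rw [ho] at h; simp at h
  · rw [ho] at h
    simp only [Option.map_some, Option.some.injEq] at h
    simpa [pv_splitOn_single] using h

-- A's loop is a flatMap of the '-' split over the ',' split
theorem pv_A_eq_flatMap (parts : List String) (acc : List String) :
    parts.foldl (fun cpu_list part =>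
      let ranges : List String := (PySem.Str.split? part "-").getD []
      if ranges.length = 1 then
        cpu_list ++ [(PySem.List.pyGet? ranges 0).getD ""]
      else
        ranges.foldl (fun cpu_list subpart => cpu_list ++ [subpart]) cpu_list) acc
      = acc ++ parts.flatMap (fun part => (PySem.Str.split? part "-").getD []) := by
  induction parts generalizing acc with
  | nil => simp
  | cons p ps ih =>
    simp only [List.foldl_cons, List.flatMap_cons]
    rw [ih]
    have hstep : (let ranges : List String := (PySem.Str.split? p "-").getD [];
        if ranges.length = 1 then
          acc ++ [(PySem.List.pyGet? ranges 0).getD ""]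
        else
          ranges.foldl (fun cpu_list subpart => cpu_list ++ [subpart]) acc)
        = acc ++ (PySem.Str.split? p "-").getD [] := by
      set ranges := (PySem.Str.split? p "-").getD [] with hr
      by_cases hlen : ranges.length = 1
      · obtain ⟨r, hone⟩ := List.length_eq_one_iff.mp hlen
        simp [hone, PySem.List.pyGet?, PySem.List.pyIdx?]
      · have : ranges.foldl (fun cpu_list subpart => cpu_list ++ [subpart]) acc
            = acc ++ ranges := by
          simpa using PySem.List.foldl_append_eq_flatMap (fun x => [x]) ranges acc
        simp [hlen, this]
    rw [hstep, List.append_assoc]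

-- ===== VERDICT (by name: the statement is the Claim_ definition above) =====
theorem get_cpu_list_spec : Claim_equal_get_cpu_list := by
  intro s _
  unfold Spec_get_cpu_list get_cpu_list get_cpu_list_alt
  simp only []
  rw [pv_A_eq_flatMap, List.nil_append]
  -- compare via toList (String.toList is injective)
  apply List.map_injective_iff.mpr (fun a b h => by
    rw [← (String.ofList_toList : String.ofList a.toList = a),
        ← (String.ofList_toList : String.ofList b.toList = b), h] : Function.Injective String.toList)
  rw [List.map_flatMap]
  have hparts : ((PySem.Str.split? s ",").getD []).map String.toList
      = s.toList.splitOnP (· == ',') := pv_map_toList_split s "," ',' rfl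
  calc ((PySem.Str.split? s ",").getD []).flatMap
          (fun part => (((PySem.Str.split? part "-").getD []).map String.toList))
      = ((PySem.Str.split? s ",").getD []).flatMap
          (fun part => part.toList.splitOnP (· == '-')) := by
        apply List.flatMap_congr
        intro p _
        exact pv_map_toList_split p "-" '-' rfl
    _ = (((PySem.Str.split? s ",").getD []).map String.toList).flatMap
          (fun q => q.splitOnP (· == '-')) := by
        rw [List.flatMap_map]
    _ = (s.toList.splitOnP (· == ',')).flatMap (fun q => q.splitOnP (· == '-')) := by
        rw [hparts]
    _ = (s.toList.map pvMapDash).splitOnP (· == ',') := (pv_key s.toList).symm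
    _ = ((PySem.Str.split? (PySem.Str.replace s "-" ",") ",").getD []).map String.toList := by
        rw [pv_map_toList_split (PySem.Str.replace s "-" ",") "," ',' rfl]
        congr 1
        rw [PySem.Str.toList_replace,
            show ("-" : String).toList = ['-'] from rfl,
            show ("," : String).toList = [','] from rfl]
        exact (pv_replace_eq_map s.toList).symm
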